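-- pv_equiv track=rewrite | github.com/pypi-data/pypi-mirror-113 | packages/plt-pack/plt_pack-0.0.3.1.tar.gz/plt_pack-0.0.3.1/src/plt_pack/utils.py | _modify_docstring
-- ===== SOURCE A (Python) =====
-- def _modify_docstring(src_doc: str, new_doc: str, docs_name: str) -> str:
--     key = '{%s}' % docs_name
--     doc_lines = src_doc.split('\n')
--     first_doc_line = ''
--
--     for num, line in enumerate(doc_lines):
--         if not first_doc_line and line:
--             first_doc_line = line
--         if key in line:
--             break
--     else:  # no docs_name found
--         return src_doc
--
--     init_indentation: int = _get_indentation(first_doc_line)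
--
--     target_indentation: int = _get_indentation(line.split(key)[0]) - init_indentation
--
--     indentation = ' ' * target_indentation
--
--     formatted_docs = f'\n{indentation}'.join(new_doc.split('\n'))
--
--     doc_lines[num] = line.replace(key, formatted_docs)
--
--     return '\n'.join(doc_lines)
--
-- def _get_indentation(src: str) -> int:
--     src = src.replace('\t', ' ' * 4)
--     return len(src) - len(src.lstrip(' '))
-- ===== SOURCE B (Python) =====
-- def _modify_docstring(src_doc: str, new_doc: str, docs_name: str) -> str:
--     # Flat-string surgery: never splits src_doc into a line list. Works directly
--     # with character indices: locate the placeholder with str.find, recover the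
--     # enclosing line's bounds with rfind/find of '\n', and rebuild by slicing.
--     key = '{%s}' % docs_name
--     if '\n' in docs_name:
--         # a placeholder name cannot span a line, so it can never match
--         return src_doc
--     pos = src_doc.find(key)
--     if pos == -1:  # no docs_name found
--         return src_doc
--
--     start = src_doc.rfind('\n', 0, pos) + 1
--     end = src_doc.find('\n', pos)
--     if end == -1:
--         end = len(src_doc)
--
--     first_doc_line = src_doc.lstrip('\n').split('\n', 1)[0]
--     indent = _indent_width(src_doc[start:pos]) - _indent_width(first_doc_line)
--
--     formatted_docs = new_doc.replace('\n', '\n' + ' ' * indent)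
--
--     return (src_doc[:start]
--             + src_doc[start:end].replace(key, formatted_docs)
--             + src_doc[end:])
--
--
-- def _indent_width(src: str) -> int:
--     # tab counts as 4 columns, a space as 1; stops at the first other character
--     width = 0
--     for c in src:
--         if c == ' ':
--             width += 1
--         elif c == '\t':
--             width += 4
--         else:
--             break
--     return width
-- ===== Notes on version B (the rewrite author's own statement) =====
-- stated objective: alternative
-- what changed: A splits the docstring into a line list, scans it with a fused for/else loop and rebuilds with '\n'.join(set line); B never builds a line list: it locates the placeholder in the flat string with str.find, recovers the enclosing line's bounds with rfind/find of '\n', and rebuilds the result by slicing, with the re-indentation done by str.replace on the inserted text.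
import Mathlib
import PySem

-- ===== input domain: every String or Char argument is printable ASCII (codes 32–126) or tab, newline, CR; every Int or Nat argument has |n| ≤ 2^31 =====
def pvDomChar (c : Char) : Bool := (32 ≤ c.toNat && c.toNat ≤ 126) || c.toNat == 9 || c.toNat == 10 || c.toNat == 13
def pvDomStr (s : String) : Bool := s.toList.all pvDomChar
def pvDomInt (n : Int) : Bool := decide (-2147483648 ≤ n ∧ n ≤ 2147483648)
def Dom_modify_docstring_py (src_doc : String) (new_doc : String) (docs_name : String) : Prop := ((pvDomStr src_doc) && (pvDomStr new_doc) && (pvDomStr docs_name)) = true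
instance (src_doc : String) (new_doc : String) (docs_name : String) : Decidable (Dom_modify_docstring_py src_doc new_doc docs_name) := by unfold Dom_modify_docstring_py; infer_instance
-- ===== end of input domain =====

-- B is a different algorithm: it never splits src_doc into a line list — it locates the
-- placeholder in the flat string (find), recovers the enclosing line's bounds with
-- rfind/find of '\n', and rebuilds the result by slicing; objective: alternative.

-- ===== PORT A =====

-- _get_indentation: src.replace('\t', ' '*4); len(src) - len(src.lstrip(' ')).
-- lstrip(' ') (strip only spaces) has no PySem primitive; ported by hand as
-- dropWhile (· == ' '), which is exactly Python's lstrip(' ').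
def pvGetIndentA (src : List Char) : Int :=
  let t := PySem.Chars.replace src ['\t'] [' ', ' ', ' ', ' ']
  (t.length : Int) - ((t.dropWhile (· == ' ')).length : Int)

-- A's for/else loop over enumerate(doc_lines): carries first_doc_line, breaks at the
-- first line containing key, returning (num, line, first_doc_line); none = the else branch.
def pvLoopA (key : List Char) : List (List Char) → Nat → List Char →
    Option (Nat × List Char × List Char)
  | [], _, _ => none
  | l :: rest, i, fdl =>
    let fdl' := if fdl.isEmpty && !l.isEmpty then l else fdl
    if PySem.Chars.isIn key l then some (i, l, fdl') else pvLoopA key rest (i + 1) fdl'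

def modify_docstring_py (src_doc : String) (new_doc : String) (docs_name : String) : String :=
  let key := ['{'] ++ docs_name.toList ++ ['}']
  let doc_lines := PySem.Chars.splitOn src_doc.toList ['\n']
  match pvLoopA key doc_lines 0 [] with
  | none => src_doc  -- for/else: no docs_name found
  | some (num, line, first_doc_line) =>
    let init_indentation := pvGetIndentA first_doc_line
    let target_indentation := pvGetIndentA ((PySem.Chars.splitOn line key).headD []) - init_indentation
    let indentation := List.replicate target_indentation.toNat ' '  -- ' ' * n; '' when n < 0
    let formatted_docs := PySem.Chars.join ('\n' :: indentation) (PySem.Chars.splitOn new_doc.toList ['\n'])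
    String.ofList (PySem.Chars.join ['\n'] (doc_lines.set num (PySem.Chars.replace line key formatted_docs)))

-- ===== PORT B =====

-- _indent_width: one weighted scan, ' ' counts 1, '\t' counts 4, anything else stops.
def pvIndentWidthB : List Char → Nat
  | [] => 0
  | c :: cs => if c = ' ' then 1 + pvIndentWidthB cs
               else if c = '\t' then 4 + pvIndentWidthB cs
               else 0

def modify_docstring_py_alt (src_doc : String) (new_doc : String) (docs_name : String) : String :=
  let key := ['{'] ++ docs_name.toList ++ ['}']
  let cs := src_doc.toList
  if PySem.Chars.isIn ['\n'] docs_name.toList then src_doc  -- a placeholder name cannot span a line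
  else
    let pos := PySem.Chars.find cs key
    if pos = -1 then src_doc  -- no docs_name found
    else
      let start := PySem.Chars.rfindFrom cs ['\n'] 0 (some pos) + 1
      let e0 := PySem.Chars.findFrom cs ['\n'] pos none
      let e := if e0 = -1 then (cs.length : Int) else e0
      -- lstrip('\n') ported by hand as dropWhile (· == '\n'): exact; split('\n', 1)[0] = headD
      let first_doc_line := ((PySem.Chars.splitMax? (cs.dropWhile (· == '\n')) ['\n'] 1).getD []).headD []
      let indent : Int := (pvIndentWidthB (PySem.List.slice cs (some start) (some pos)) : Int)
                          - (pvIndentWidthB first_doc_line : Int)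
      let formatted_docs := PySem.Chars.replace new_doc.toList ['\n'] ('\n' :: List.replicate indent.toNat ' ')
      String.ofList (PySem.List.slice cs none (some start)
        ++ PySem.Chars.replace (PySem.List.slice cs (some start) (some e)) key formatted_docs
        ++ PySem.List.slice cs (some e) none)

-- ===== PRECONDITION & SPEC =====
def Spec_modify_docstring_py (src_doc : String) (new_doc : String) (docs_name : String) (out : String) : Prop := out = modify_docstring_py_alt src_doc new_doc docs_name
instance (src_doc : String) (new_doc : String) (docs_name : String) (out : String) : Decidable (Spec_modify_docstring_py src_doc new_doc docs_name out) := by unfold Spec_modify_docstring_py; infer_instance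

-- ===== CLAIM (what is proved, stated in full; the proofs are below) =====
def Claim_equal_modify_docstring_py : Prop := ∀ (src_doc : String) (new_doc : String) (docs_name : String), Dom_modify_docstring_py src_doc new_doc docs_name → Spec_modify_docstring_py src_doc new_doc docs_name (modify_docstring_py src_doc new_doc docs_name)

-- ===== LEMMAS AND PROOFS =====

-- ---- replace with a single-char old is character-wise substitution ----
theorem pv_replace_go_single (a : Char) (new : List Char) :
    ∀ (fuel : Nat) (l acc : List Char), l.length ≤ fuel →
      PySem.Chars.replace.go [a] new fuel l acc
        = acc.reverse ++ l.flatMap (fun c => if c = a then new else [c]) := by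
  intro fuel
  induction fuel with
  | zero =>
    intro l acc h
    have : l = [] := by cases l <;> simp_all
    subst this; rw [PySem.Chars.replace.go]; simp
  | succ n ih =>
    intro l acc h
    cases l with
    | nil => rw [PySem.Chars.replace.go]; simp; omega
    | cons c t =>
      rw [PySem.Chars.replace.go]
      by_cases hca : c = a
      · simp [hca, List.isPrefixOf, ih t _ (by simpa using h)]
      · have hp : ([a].isPrefixOf (c :: t)) = false := by
          simp [List.isPrefixOf]; exact fun h' => hca h'.symm
        simp [hp, ih t _ (by simpa using h), hca]

theorem pv_replace_single (a : Char) (s new : List Char) :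
    PySem.Chars.replace s [a] new = s.flatMap (fun c => if c = a then new else [c]) := by
  rw [PySem.Chars.replace]
  simp [pv_replace_go_single a new s.length s [] le_rfl]

-- ---- the two indentation helpers agree ----
theorem pv_takeWhile_indent (cs : List Char) :
    (List.takeWhile (· == ' ')
        (cs.flatMap (fun c => if c = '\t' then [' ', ' ', ' ', ' '] else [c]))).length
      = pvIndentWidthB cs := by
  induction cs with
  | nil => simp [pvIndentWidthB]
  | cons c cs ih =>
    by_cases h1 : c = '\t'
    · simp [h1, pvIndentWidthB, List.takeWhile, ih]; omega
    · by_cases h2 : c = ' '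
      · simp [h2, pvIndentWidthB, ih]; omega
      · simp [h1, h2, pvIndentWidthB]

theorem pv_indent_eq (cs : List Char) : pvGetIndentA cs = (pvIndentWidthB cs : Int) := by
  rw [pvGetIndentA]
  simp only [pv_replace_single]
  have h2 := congrArg List.length
    (List.takeWhile_append_dropWhile (p := (· == ' '))
      (l := cs.flatMap (fun c => if c = '\t' then [' ', ' ', ' ', ' '] else [c])))
  rw [List.length_append] at h2
  rw [← pv_takeWhile_indent cs]
  omega

-- ---- A's fused scan equals a findIdx?/find? characterization ----
theorem pv_loopA_eq (key : List Char) (hk : key ≠ []) :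
    ∀ (lines : List (List Char)) (i : Nat) (fdl : List Char),
      pvLoopA key lines i fdl
        = (lines.findIdx? (fun l => PySem.Chars.isIn key l)).map
            (fun j => (i + j, lines[j]?.getD [],
              if fdl.isEmpty then (lines.find? (fun l => !l.isEmpty)).getD [] else fdl)) := by
  intro lines
  induction lines with
  | nil => intro i fdl; simp [pvLoopA]
  | cons l rest ih =>
    intro i fdl
    rw [pvLoopA]
    by_cases hin : PySem.Chars.isIn key l = true
    · have hl : l ≠ [] := by
        intro h; subst h
        have := (PySem.Chars.isIn_iff_infix key []).mp hin
        simp at this; exact hk this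
      by_cases hf : fdl = []
      · simp [hin, hf, List.findIdx?_cons, hl]
      · simp [hin, hf, List.findIdx?_cons]
    · rw [ih]
      by_cases hl : l = []
      · subst hl
        by_cases hf : fdl = [] <;>
          cases hgl : List.findIdx? (fun l => PySem.Chars.isIn key l) rest <;>
          simp [hin, hf, hgl, List.findIdx?_cons] <;> omega
      · by_cases hf : fdl = [] <;>
          cases hgl : List.findIdx? (fun l => PySem.Chars.isIn key l) rest <;>
          simp [hin, hl, hf, hgl, List.findIdx?_cons] <;> omega

-- ---- structure of PySem.Chars.splitOn ----
theorem pv_split_go_acc (sep : List Char) :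
    ∀ (fuel : Nat) (l cur : List Char) (acc : List (List Char)),
      PySem.Chars.splitOn.go sep fuel l cur acc
        = acc.reverse ++ PySem.Chars.splitOn.go sep fuel l cur [] := by
  intro fuel
  induction fuel with
  | zero =>
    intro l cur acc
    rw [PySem.Chars.splitOn.go, PySem.Chars.splitOn.go]
    simp
  | succ n ih =>
    intro l cur acc
    cases l with
    | nil =>
      rw [PySem.Chars.splitOn.go, PySem.Chars.splitOn.go]
      · simp
      all_goals omega
    | cons c t =>
      rw [PySem.Chars.splitOn.go, PySem.Chars.splitOn.go]
      by_cases hp : sep.isPrefixOf (c :: t) = true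
      · simp only [hp, if_true]
        rw [ih _ _ (cur.reverse :: acc), ih _ _ [cur.reverse]]
        simp
      · simp only [hp, Bool.false_eq_true, if_false]
        exact ih _ _ acc

theorem pv_split_go_cur (sep : List Char) :
    ∀ (fuel : Nat) (l cur : List Char),
      PySem.Chars.splitOn.go sep fuel l cur []
        = (PySem.Chars.splitOn.go sep fuel l [] []).modifyHead (cur.reverse ++ ·) := by
  intro fuel
  induction fuel with
  | zero =>
    intro l cur
    rw [PySem.Chars.splitOn.go, PySem.Chars.splitOn.go]
    simp
  | succ n ih =>
    intro l cur
    cases l with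
    | nil =>
      rw [PySem.Chars.splitOn.go, PySem.Chars.splitOn.go]
      · simp
      all_goals omega
    | cons c t =>
      rw [PySem.Chars.splitOn.go, PySem.Chars.splitOn.go]
      by_cases hp : sep.isPrefixOf (c :: t) = true
      · simp only [hp, if_true, List.reverse_nil]
        rw [pv_split_go_acc sep n _ _ [cur.reverse], pv_split_go_acc sep n _ _ [[]]]
        simp
      · simp only [hp, Bool.false_eq_true, if_false]
        rw [ih t (c :: cur), ih t [c], List.modifyHead_modifyHead]
        congr 1
        funext x
        simp

theorem pv_split_go_ne (sep : List Char) :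
    ∀ (fuel : Nat) (l cur : List Char) (acc : List (List Char)),
      PySem.Chars.splitOn.go sep fuel l cur acc ≠ [] := by
  intro fuel
  induction fuel with
  | zero => intro l cur acc; rw [PySem.Chars.splitOn.go]; simp
  | succ n ih =>
    intro l cur acc
    cases l with
    | nil =>
      rw [PySem.Chars.splitOn.go]
      · simp
      all_goals omega
    | cons c t =>
      rw [PySem.Chars.splitOn.go]
      by_cases hp : sep.isPrefixOf (c :: t) = true
      · simp only [hp, if_true]; exact ih _ _ _
      · simp only [hp, Bool.false_eq_true, if_false]; exact ih _ _ _

theorem pv_splitOn_nil (a : Char) : PySem.Chars.splitOn [] [a] = [[]] := by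
  rw [PySem.Chars.splitOn, PySem.Chars.splitOn.go]
  · simp
  all_goals omega

theorem pv_splitOn_cons (a c : Char) (w : List Char) :
    PySem.Chars.splitOn (c :: w) [a]
      = if c = a then [] :: PySem.Chars.splitOn w [a]
        else (PySem.Chars.splitOn w [a]).modifyHead (c :: ·) := by
  rw [PySem.Chars.splitOn, PySem.Chars.splitOn]
  simp only [List.length_cons]
  rw [PySem.Chars.splitOn.go]
  by_cases hca : c = a
  · subst hca
    have hp : ([c].isPrefixOf (c :: w)) = true := by simp [List.isPrefixOf]
    rw [if_pos hp, if_pos rfl]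
    rw [pv_split_go_acc [c] (w.length + 1) _ _ [[].reverse]]
    simp
  · have hp : ([a].isPrefixOf (c :: w)) = false := by
      simp [List.isPrefixOf]; exact fun h => hca h.symm
    rw [if_neg (by simp [hp]), if_neg hca]
    rw [pv_split_go_cur [a] (w.length + 1) w [c]]
    congr 1

theorem pv_splitOn_ne_nil (a : Char) (w : List Char) : PySem.Chars.splitOn w [a] ≠ [] := by
  rw [PySem.Chars.splitOn]; exact pv_split_go_ne _ _ _ _ _

theorem pv_mem_splitOn_free (a : Char) (w : List Char) :
    ∀ l ∈ PySem.Chars.splitOn w [a], a ∉ l := by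
  induction w with
  | nil => intro l hl; rw [pv_splitOn_nil] at hl; simp at hl; simp [hl]
  | cons c t ih =>
    intro l hl
    rw [pv_splitOn_cons] at hl
    by_cases hca : c = a
    · rw [if_pos hca] at hl
      rcases List.mem_cons.mp hl with hl | hl
      · simp [hl]
      · exact ih l hl
    · rw [if_neg hca] at hl
      obtain ⟨h, rest, hht⟩ : ∃ h rest, PySem.Chars.splitOn t [a] = h :: rest := by
        cases hh : PySem.Chars.splitOn t [a] with
        | nil => exact absurd hh (pv_splitOn_ne_nil a t)
        | cons x y => exact ⟨x, y, rfl⟩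
      rw [hht] at hl
      simp only [List.modifyHead_cons, List.mem_cons] at hl
      rcases hl with hl | hl
      · subst hl
        intro hmem
        rcases List.mem_cons.mp hmem with h1 | h1
        · exact hca h1.symm
        · exact ih h (by rw [hht]; exact List.mem_cons_self ..) h1
      · exact ih l (by rw [hht]; exact List.mem_cons_of_mem _ hl)

theorem pv_join_modifyHead (s : List Char) (c : Char) (M : List (List Char)) (hM : M ≠ []) :
    PySem.Chars.join s (M.modifyHead (c :: ·)) = c :: PySem.Chars.join s M := by
  cases M with
  | nil => exact absurd rfl hM
  | cons h t =>
    cases t with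
    | nil => simp [PySem.Chars.join_singleton]
    | cons q r =>
      simp only [List.modifyHead_cons]
      rw [PySem.Chars.join_cons_cons, PySem.Chars.join_cons_cons]
      simp

theorem pv_join_splitOn (a : Char) (w : List Char) :
    PySem.Chars.join [a] (PySem.Chars.splitOn w [a]) = w := by
  induction w with
  | nil => rw [pv_splitOn_nil, PySem.Chars.join_singleton]
  | cons c t ih =>
    rw [pv_splitOn_cons]
    by_cases hca : c = a
    · rw [if_pos hca]
      obtain ⟨h, rest, hht⟩ : ∃ h rest, PySem.Chars.splitOn t [a] = h :: rest := by
        cases hh : PySem.Chars.splitOn t [a] with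
        | nil => exact absurd hh (pv_splitOn_ne_nil a t)
        | cons x y => exact ⟨x, y, rfl⟩
      rw [hht, PySem.Chars.join_cons_cons, ← hht, ih]
      simp [hca]
    · rw [if_neg hca]
      rw [pv_join_modifyHead _ _ _ (pv_splitOn_ne_nil a t), ih]

-- the prefix of a list before the first occurrence of key (proof-side helper)
def pvPref (key : List Char) : List Char → List Char
  | [] => []
  | c :: r => if key.isPrefixOf (c :: r) then [] else c :: pvPref key r

theorem pv_split_go_headD (key : List Char) :
    ∀ (fuel : Nat) (l : List Char), l.length ≤ fuel →
      (PySem.Chars.splitOn.go key fuel l [] []).headD [] = pvPref key l := by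
  intro fuel
  induction fuel with
  | zero =>
    intro l h
    have : l = [] := by cases l <;> simp_all
    subst this; rw [PySem.Chars.splitOn.go]; simp [pvPref]
  | succ n ih =>
    intro l h
    cases l with
    | nil =>
      rw [PySem.Chars.splitOn.go]
      · simp [pvPref]
      all_goals omega
    | cons c t =>
      rw [PySem.Chars.splitOn.go]
      by_cases hp : key.isPrefixOf (c :: t) = true
      · simp only [hp, if_true, List.reverse_nil]
        rw [pv_split_go_acc key n _ _ [[]]]
        simp [pvPref, hp]
      · simp only [hp, Bool.false_eq_true, if_false]
        rw [pv_split_go_cur key n t [c]]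
        have hne := pv_split_go_ne key n t [] []
        cases hgo : PySem.Chars.splitOn.go key n t [] [] with
        | nil => exact absurd hgo hne
        | cons x y =>
          have hih := ih t (by simp at h; omega)
          rw [hgo] at hih
          simp only [List.headD_cons] at hih
          simp [pvPref, hp, hih]

theorem pv_splitOn_headD (key : List Char) (l : List Char) :
    (PySem.Chars.splitOn l key).headD [] = pvPref key l := by
  rw [PySem.Chars.splitOn]
  exact pv_split_go_headD key (l.length + 1) l (by omega)

theorem pv_pref_take (key : List Char) :
    ∀ (m : Nat) (l : List Char), key <+: l.drop m → (∀ i < m, ¬ key <+: l.drop i) →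
      pvPref key l = l.take m := by
  intro m
  induction m with
  | zero =>
    intro l h1 _
    cases l with
    | nil => simp [pvPref]
    | cons c r =>
      simp only [List.drop_zero] at h1
      simp [pvPref, List.isPrefixOf_iff_prefix.mpr h1]
  | succ n ih =>
    intro l h1 h2
    cases l with
    | nil =>
      exfalso
      exact h2 0 (by omega) (by simpa using h1)
    | cons c r =>
      have hnp : ¬ key <+: (c :: r) := by simpa using h2 0 (by omega)
      have hp : key.isPrefixOf (c :: r) = false := by
        rw [← Bool.not_eq_true, List.isPrefixOf_iff_prefix]; exact hnp
      simp only [pvPref, hp, Bool.false_eq_true, if_false, List.take_succ_cons]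
      congr 1
      exact ih r (by simpa using h1) (fun i hi => by simpa using h2 (i + 1) (by omega))

-- ---- head of split(sep, 1): take up to the first separator ----
theorem pv_splitMax_go_acc (sep : List Char) :
    ∀ (fuel m : Nat) (l cur : List Char) (acc : List (List Char)),
      PySem.Chars.splitOnMax.go sep fuel m l cur acc
        = acc.reverse ++ PySem.Chars.splitOnMax.go sep fuel m l cur [] := by
  intro fuel
  induction fuel with
  | zero =>
    intro m l cur acc
    rw [PySem.Chars.splitOnMax.go, PySem.Chars.splitOnMax.go]
    simp
  | succ n ih =>
    intro m l cur acc
    cases l with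
    | nil =>
      rw [PySem.Chars.splitOnMax.go, PySem.Chars.splitOnMax.go]
      · simp
      all_goals omega
    | cons c t =>
      rw [PySem.Chars.splitOnMax.go, PySem.Chars.splitOnMax.go]
      by_cases hm : m = 0
      · simp [hm]
      · by_cases hp : sep.isPrefixOf (c :: t) = true
        · rw [if_neg hm, if_neg hm, if_pos hp, if_pos hp]
          rw [ih _ _ _ (cur.reverse :: acc), ih _ _ _ [cur.reverse]]
          simp
        · rw [if_neg hm, if_neg hm, if_neg (by simp [hp]), if_neg (by simp [hp])]
          exact ih _ _ _ acc

theorem pv_splitMax1_headD (a : Char) :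
    ∀ (fuel : Nat) (w cur : List Char), w.length ≤ fuel →
      (PySem.Chars.splitOnMax.go [a] fuel 1 w cur []).headD []
        = cur.reverse ++ w.takeWhile (· ≠ a) := by
  intro fuel
  induction fuel with
  | zero =>
    intro w cur h
    have : w = [] := by cases w <;> simp_all
    subst this; rw [PySem.Chars.splitOnMax.go]; simp
  | succ n ih =>
    intro w cur h
    cases w with
    | nil =>
      rw [PySem.Chars.splitOnMax.go]
      · simp
      all_goals omega
    | cons c t =>
      rw [PySem.Chars.splitOnMax.go]
      rw [if_neg (by omega : ¬ (1 : Nat) = 0)]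
      by_cases hca : c = a
      · subst hca
        have hp : ([c].isPrefixOf (c :: t)) = true := by simp [List.isPrefixOf]
        rw [if_pos hp]
        rw [pv_splitMax_go_acc [c] n 0 _ _ [cur.reverse]]
        simp
      · have hp : ([a].isPrefixOf (c :: t)) = false := by
          simp [List.isPrefixOf]; exact fun h' => hca h'.symm
        rw [if_neg (by simp [hp])]
        rw [ih t (c :: cur) (by simp at h; omega)]
        simp [hca]

theorem pv_splitMax_headD (a : Char) (w : List Char) :
    (((PySem.Chars.splitMax? w [a] 1).getD []).headD []) = w.takeWhile (· ≠ a) := by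
  rw [PySem.Chars.splitMax?]
  simp only [List.isEmpty_cons, Bool.false_eq_true, if_false, Option.getD_some]
  rw [PySem.Chars.splitOnMax]
  rw [if_neg (by omega : ¬ (1 : Int) < 0)]
  have := pv_splitMax1_headD a (w.length + 1) w [] (by omega)
  simpa using this

-- ---- first non-empty line ----
theorem pv_splitOn_headD_takeWhile (a : Char) (w : List Char) :
    (PySem.Chars.splitOn w [a]).headD [] = w.takeWhile (· ≠ a) := by
  induction w with
  | nil => rw [pv_splitOn_nil]; simp
  | cons c t ih =>
    rw [pv_splitOn_cons]
    by_cases hca : c = a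
    · rw [if_pos hca]
      simp [hca]
    · rw [if_neg hca]
      obtain ⟨h, rest, hht⟩ : ∃ h rest, PySem.Chars.splitOn t [a] = h :: rest := by
        cases hh : PySem.Chars.splitOn t [a] with
        | nil => exact absurd hh (pv_splitOn_ne_nil a t)
        | cons x y => exact ⟨x, y, rfl⟩
      rw [hht] at ih ⊢
      simp only [List.headD_cons] at ih
      simp [hca, ih]

theorem pv_fdl (a : Char) (cs : List Char) :
    (cs.dropWhile (· == a)).takeWhile (· ≠ a)
      = ((PySem.Chars.splitOn cs [a]).find? (fun l => !l.isEmpty)).getD [] := by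
  induction cs with
  | nil => rw [pv_splitOn_nil]; simp
  | cons c t ih =>
    rw [pv_splitOn_cons]
    by_cases hca : c = a
    · rw [if_pos hca]
      have hdw : List.dropWhile (fun x => x == a) (c :: t) = List.dropWhile (fun x => x == a) t := by
        simp [hca]
      rw [hdw, ih]
      simp
    · rw [if_neg hca]
      obtain ⟨h, rest, hht⟩ : ∃ h rest, PySem.Chars.splitOn t [a] = h :: rest := by
        cases hh : PySem.Chars.splitOn t [a] with
        | nil => exact absurd hh (pv_splitOn_ne_nil a t)
        | cons x y => exact ⟨x, y, rfl⟩
      have hhd : h = t.takeWhile (· ≠ a) := by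
        have := pv_splitOn_headD_takeWhile a t
        rw [hht] at this; simpa using this
      have hcb : (c == a) = false := by simp [hca]
      rw [hht, List.dropWhile_cons_of_neg (by simp [hca])]
      simp [hca, hhd]

-- ---- rfind of a single char ----
theorem pv_isPrefixOf_singleton (a : Char) (l : List Char) :
    [a].isPrefixOf l = true ↔ l[0]? = some a := by
  cases l with
  | nil => simp [List.isPrefixOf]
  | cons c t =>
    simp [List.isPrefixOf]
    exact ⟨fun h => h.symm, fun h => h.symm⟩

theorem pv_rfind_go_none (a : Char) (s : List Char) :
    ∀ (j : Nat), (∀ k ≤ j, s[k]? ≠ some a) → PySem.Chars.rfind.go s [a] j = -1 := by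
  intro j
  induction j with
  | zero =>
    intro h
    rw [PySem.Chars.rfind.go]
    have : ([a].isPrefixOf s) = false := by
      rw [← Bool.not_eq_true, pv_isPrefixOf_singleton]
      exact h 0 (by omega)
    simp [this]
  | succ n ih =>
    intro h
    rw [PySem.Chars.rfind.go]
    have hd : ([a].isPrefixOf (List.drop (n + 1) s)) = false := by
      rw [← Bool.not_eq_true, pv_isPrefixOf_singleton, List.getElem?_drop]
      exact h (n + 1) le_rfl
    simp only [hd, Bool.false_eq_true, if_false]
    exact ih (fun k hk => h k (by omega))

theorem pv_rfind_go_eq (a : Char) (s : List Char) :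
    ∀ (j m : Nat), m ≤ j → s[m]? = some a → (∀ k, m < k → k ≤ j → s[k]? ≠ some a) →
      PySem.Chars.rfind.go s [a] j = (m : Int) := by
  intro j
  induction j with
  | zero =>
    intro m hm h1 _
    have : m = 0 := by omega
    subst this
    rw [PySem.Chars.rfind.go]
    have : ([a].isPrefixOf s) = true := by
      rw [pv_isPrefixOf_singleton]
      simpa using h1
    simp [this]
  | succ n ih =>
    intro m hm h1 h2
    rw [PySem.Chars.rfind.go]
    by_cases hmeq : m = n + 1
    · subst hmeq
      have : ([a].isPrefixOf (List.drop (n + 1) s)) = true := by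
        rw [pv_isPrefixOf_singleton, List.getElem?_drop]
        simpa using h1
      simp [this]
    · have hmn : m ≤ n := by omega
      have hd : ([a].isPrefixOf (List.drop (n + 1) s)) = false := by
        rw [← Bool.not_eq_true, pv_isPrefixOf_singleton, List.getElem?_drop]
        exact h2 (n + 1) (by omega) le_rfl
      simp only [hd, Bool.false_eq_true, if_false]
      exact ih m hmn h1 (fun k hk1 hk2 => h2 k hk1 (by omega))

theorem pv_rfind_none (a : Char) (w : List Char) (hw : a ∉ w) :
    PySem.Chars.rfind w [a] = -1 := by
  rw [PySem.Chars.rfind]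
  apply pv_rfind_go_none
  intro k _ hk
  have hlt : k < w.length := by
    by_contra hge
    rw [List.getElem?_eq_none (by omega)] at hk
    simp at hk
  rw [List.getElem?_eq_getElem hlt] at hk
  have : w[k] = a := by simpa using hk
  exact hw (this ▸ List.getElem_mem hlt)

theorem pv_rfind_last (a : Char) (u w : List Char) (hw : a ∉ w) :
    PySem.Chars.rfind (u ++ a :: w) [a] = (u.length : Int) := by
  rw [PySem.Chars.rfind]
  apply pv_rfind_go_eq
  · simp only [List.length_append, List.length_cons]; omega
  · rw [List.getElem?_append_right le_rfl]
    simp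
  · intro k hk1 _ hk3
    rw [List.getElem?_append_right (by omega)] at hk3
    obtain ⟨d, hd⟩ : ∃ d, k - u.length = d + 1 := ⟨k - u.length - 1, by omega⟩
    rw [hd] at hk3
    simp only [List.getElem?_cons_succ] at hk3
    have hlt : d < w.length := by
      by_contra hge
      rw [List.getElem?_eq_none (by omega)] at hk3
      simp at hk3
    rw [List.getElem?_eq_getElem hlt] at hk3
    have : w[d] = a := by simpa using hk3
    exact hw (this ▸ List.getElem_mem hlt)

-- ---- find: uniqueness of the first occurrence ----
theorem pv_find_eq (key s : List Char) (m : Nat) (h1 : key <+: s.drop m)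
    (h2 : ∀ i < m, ¬ key <+: s.drop i) : PySem.Chars.find s key = (m : Int) := by
  have hinf : key <:+: s := (h1.isInfix).trans (List.drop_suffix m s).isInfix
  have hnn : 0 ≤ PySem.Chars.find s key := (PySem.Chars.find_nonneg_iff s key).mpr hinf
  obtain ⟨hp, hmin⟩ := PySem.Chars.find_spec (s := s) (sub := key) hnn
  rcases lt_trichotomy (PySem.Chars.find s key).toNat m with h | h | h
  · exact absurd hp (h2 _ h)
  · omega
  · exact absurd h1 (hmin m h)

theorem pv_prefix_cut (a : Char) (key : List Char) (ha : a ∉ key) (u v : List Char) :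
    key <+: u ++ a :: v ↔ key <+: u := by
  constructor
  · intro h
    induction u generalizing key with
    | nil =>
      cases key with
      | nil => exact List.nil_prefix
      | cons k ks =>
        exfalso
        rw [List.nil_append, List.cons_prefix_cons] at h
        exact ha (h.1 ▸ List.mem_cons_self ..)
    | cons x u' ih =>
      cases key with
      | nil => exact List.nil_prefix
      | cons k ks =>
        rw [List.cons_append, List.cons_prefix_cons] at h
        rw [List.cons_prefix_cons]
        exact ⟨h.1, ih ks (fun hm => ha (List.mem_cons_of_mem _ hm)) h.2⟩
  · intro h
    exact h.trans (List.prefix_append u (a :: v))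

theorem pv_infix_straddle (a : Char) (key : List Char) (ha : a ∉ key) (u v : List Char) :
    key <:+: u ++ a :: v ↔ key <:+: u ∨ key <:+: v := by
  constructor
  · intro h
    induction u with
    | nil =>
      rw [List.nil_append, List.infix_cons_iff] at h
      rcases h with h | h
      · cases key with
        | nil => exact Or.inl List.nil_infix
        | cons k ks =>
          exfalso
          rw [List.cons_prefix_cons] at h
          exact ha (h.1 ▸ List.mem_cons_self ..)
      · exact Or.inr h
    | cons x u' ih =>
      rw [List.cons_append, List.infix_cons_iff] at h
      rcases h with h | h
      · cases key with
        | nil => exact Or.inl List.nil_infix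
        | cons k ks =>
          rw [List.cons_prefix_cons] at h
          have hks : ks <+: u' :=
            (pv_prefix_cut a ks (fun hm => ha (List.mem_cons_of_mem _ hm)) u' v).mp h.2
          exact Or.inl (List.IsPrefix.isInfix (by rw [List.cons_prefix_cons]; exact ⟨h.1, hks⟩))
      · rcases ih h with h' | h'
        · exact Or.inl ((List.infix_cons_iff).mpr (Or.inr h'))
        · exact Or.inr h'
  · intro h
    rcases h with h | h
    · exact h.trans (List.prefix_append u (a :: v)).isInfix
    · exact h.trans (List.IsSuffix.isInfix ⟨u ++ [a], by simp⟩)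

theorem pv_singleton_infix (a : Char) (w : List Char) : [a] <:+: w ↔ a ∈ w := by
  constructor
  · intro h
    exact h.subset (List.mem_cons_self ..)
  · intro h
    obtain ⟨s, t, hst⟩ := List.append_of_mem h
    exact ⟨s, t, by simp [hst]⟩

-- ---- join/flatMap decomposition of a line list ----
theorem pv_join_append (a : Char) (P M : List (List Char)) (hM : M ≠ []) :
    PySem.Chars.join [a] (P ++ M)
      = P.flatMap (fun l => l ++ [a]) ++ PySem.Chars.join [a] M := by
  induction P with
  | nil => simp
  | cons l P' ih =>
    obtain ⟨q, rest, hq⟩ : ∃ q rest, P' ++ M = q :: rest := by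
      cases hh : P' ++ M with
      | nil => simp [List.append_eq_nil_iff] at hh; exact absurd hh.2 hM
      | cons x y => exact ⟨x, y, rfl⟩
    rw [List.cons_append, hq, PySem.Chars.join_cons_cons, ← hq, ih]
    simp

theorem pv_mem_infix_join (a : Char) (M : List (List Char)) (l : List Char) (h : l ∈ M) :
    l <:+: PySem.Chars.join [a] M := by
  induction M with
  | nil => simp at h
  | cons x M' ih =>
    rcases List.mem_cons.mp h with h' | h'
    · subst h'
      cases M' with
      | nil => rw [PySem.Chars.join_singleton]
      | cons q r =>
        rw [PySem.Chars.join_cons_cons]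
        exact (List.prefix_append l ([a] ++ PySem.Chars.join [a] (q :: r))).isInfix.trans
          (by rw [List.append_assoc])
    · cases M' with
      | nil => simp at h'
      | cons q r =>
        rw [PySem.Chars.join_cons_cons]
        exact (ih h').trans (List.IsSuffix.isInfix ⟨x ++ [a], by simp⟩)

theorem pv_infix_join_exists (a : Char) (key : List Char) (ha : a ∉ key) (hk : key ≠ [])
    (M : List (List Char)) (h : key <:+: PySem.Chars.join [a] M) :
    ∃ l ∈ M, key <:+: l := by
  induction M with
  | nil =>
    rw [PySem.Chars.join_nil, List.infix_nil] at h
    exact absurd h hk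
  | cons x M' ih =>
    cases M' with
    | nil =>
      rw [PySem.Chars.join_singleton] at h
      exact ⟨x, List.mem_cons_self .., h⟩
    | cons q r =>
      rw [PySem.Chars.join_cons_cons, List.append_assoc, List.singleton_append] at h
      rcases (pv_infix_straddle a key ha x _).mp h with h' | h'
      · exact ⟨x, List.mem_cons_self .., h'⟩
      · obtain ⟨l, hl, hinf⟩ := ih h'
        exact ⟨l, List.mem_cons_of_mem _ hl, hinf⟩

theorem pv_occ_flatMap (a : Char) (key : List Char) (ha : a ∉ key)
    (P : List (List Char)) (hP : ∀ l ∈ P, a ∉ l ∧ ¬ key <:+: l) (T : List Char) :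
    ∀ i, i < (P.flatMap (fun l => l ++ [a])).length →
      ¬ key <+: ((P.flatMap (fun l => l ++ [a])) ++ T).drop i := by
  induction P generalizing T with
  | nil => intro i hi; simp at hi
  | cons l P' ih =>
    intro i hi hpre
    obtain ⟨hal, hkl⟩ := hP l (List.mem_cons_self ..)
    simp only [List.flatMap_cons] at hi hpre
    by_cases hil : i ≤ l.length
    · rw [List.append_assoc, List.append_assoc,
          List.drop_append_of_le_length hil] at hpre
      rw [List.singleton_append] at hpre
      have : key <+: l.drop i := (pv_prefix_cut a key ha _ _).mp hpre
      exact hkl (this.isInfix.trans (List.drop_suffix i l).isInfix)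
    · have hi' : i - (l.length + 1) < (P'.flatMap (fun l => l ++ [a])).length := by
        simp only [List.length_append, List.length_cons, List.length_nil] at hi ⊢
        omega
      rw [List.append_assoc, List.drop_append] at hpre
      have hdn : List.drop i (l ++ [a]) = [] := by
        apply List.drop_eq_nil_of_le
        simp; omega
      rw [hdn, List.nil_append] at hpre
      have hlen : (l ++ [a]).length = l.length + 1 := by simp
      rw [hlen] at hpre
      exact ih (fun x hx => hP x (List.mem_cons_of_mem _ hx)) T (i - (l.length + 1)) hi' hpre

theorem pv_flatMap_last (a : Char) (P : List (List Char)) (hP : P ≠ []) :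
    ∃ V, P.flatMap (fun l => l ++ [a]) = V ++ [a] := by
  induction P with
  | nil => exact absurd rfl hP
  | cons l P' ih =>
    cases P' with
    | nil => exact ⟨l, by simp⟩
    | cons q r =>
      obtain ⟨V', hV'⟩ := ih (by simp)
      exact ⟨l ++ [a] ++ V', by simp [hV']⟩

theorem pv_find_first (a : Char) (w v : List Char) (hw : a ∉ w) :
    PySem.Chars.find (w ++ a :: v) [a] = (w.length : Int) := by
  apply pv_find_eq
  · rw [List.drop_append_of_le_length le_rfl]
    simp
  · intro i hi hpre
    rw [List.drop_append_of_le_length (by omega)] at hpre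
    have hne : w.drop i ≠ [] := by
      intro hcon
      have := congrArg List.length hcon
      simp at this; omega
    obtain ⟨c, t, hct⟩ := List.exists_cons_of_ne_nil hne
    rw [hct, List.cons_append, List.cons_prefix_cons] at hpre
    have : a ∈ w.drop i := by rw [hct]; exact hpre.1 ▸ List.mem_cons_self ..
    exact hw (List.mem_of_mem_drop this)

-- ---- the formatted replacement text ----
theorem pv_join_replace (a : Char) (ind w : List Char) :
    PySem.Chars.join (a :: ind) (PySem.Chars.splitOn w [a])
      = PySem.Chars.replace w [a] (a :: ind) := by
  rw [pv_replace_single]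
  induction w with
  | nil => rw [pv_splitOn_nil, PySem.Chars.join_singleton]; simp
  | cons c t ih =>
    rw [pv_splitOn_cons]
    by_cases hca : c = a
    · rw [if_pos hca]
      obtain ⟨h, rest, hht⟩ : ∃ h rest, PySem.Chars.splitOn t [a] = h :: rest := by
        cases hh : PySem.Chars.splitOn t [a] with
        | nil => exact absurd hh (pv_splitOn_ne_nil a t)
        | cons x y => exact ⟨x, y, rfl⟩
      rw [hht, PySem.Chars.join_cons_cons, ← hht, ih]
      simp [hca]
    · rw [if_neg hca]
      rw [pv_join_modifyHead _ _ _ (pv_splitOn_ne_nil a t), ih]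
      simp [hca]

-- ===== VERDICT (by name: the statement is the Claim_ definition above) =====
theorem modify_docstring_py_spec : Claim_equal_modify_docstring_py := by
  intro src_doc new_doc docs_name _
  unfold Spec_modify_docstring_py
  simp only [modify_docstring_py, modify_docstring_py_alt]
  set key := ['{'] ++ docs_name.toList ++ ['}'] with hkey
  set cs := src_doc.toList with hcs
  have hk : key ≠ [] := by simp [hkey]
  set L := PySem.Chars.splitOn cs ['\n'] with hLdef
  rw [pv_loopA_eq key hk]
  have hfreeL : ∀ l ∈ L, '\n' ∉ l := pv_mem_splitOn_free '\n' cs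
  have hjoin : PySem.Chars.join ['\n'] L = cs := pv_join_splitOn '\n' cs
  by_cases hnl : PySem.Chars.isIn ['\n'] docs_name.toList = true
  · -- a newline inside the name: the key fits in no line, both sides return src_doc
    have hmem : '\n' ∈ key := by
      have := (PySem.Chars.isIn_iff_infix _ _).mp hnl
      have hmm : '\n' ∈ docs_name.toList := (pv_singleton_infix _ _).mp this
      simp [hkey, hmm]
    have hidx : L.findIdx? (fun l => PySem.Chars.isIn key l) = none := by
      rw [List.findIdx?_eq_none_iff]
      intro l hl
      rw [PySem.Chars.isIn_eq_false_iff]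
      intro hinf
      exact (hfreeL l hl) (hinf.subset hmem)
    rw [hidx, hnl]
    simp
  · -- no newline in the key
    have hfree : '\n' ∉ key := by
      have hnm : '\n' ∉ docs_name.toList := by
        intro hmm
        exact hnl ((PySem.Chars.isIn_iff_infix _ _).mpr ((pv_singleton_infix _ _).mpr hmm))
      simp [hkey, hnm]
    rw [Bool.not_eq_true] at hnl
    rw [hnl]
    simp only [Bool.false_eq_true, if_false]
    by_cases hfind : PySem.Chars.find cs key = -1
    · -- key nowhere: both sides return src_doc
      have hninf : ¬ key <:+: cs := (PySem.Chars.find_eq_neg_one_iff _ _).mp hfind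
      have hidx : L.findIdx? (fun l => PySem.Chars.isIn key l) = none := by
        rw [List.findIdx?_eq_none_iff]
        intro l hl
        rw [PySem.Chars.isIn_eq_false_iff]
        intro hinf
        exact hninf (hjoin ▸ (hinf.trans (pv_mem_infix_join '\n' L l hl)))
      rw [hidx, hfind]
      simp
    · -- the key occurs; locate its line
      have hinfcs : key <:+: cs := (PySem.Chars.find_ne_neg_one_iff _ _).mp hfind
      obtain ⟨l₀, hl₀, hinf₀⟩ := pv_infix_join_exists '\n' key hfree hk L (hjoin ▸ hinfcs)
      obtain ⟨j, hj⟩ : ∃ j, L.findIdx? (fun l => PySem.Chars.isIn key l) = some j := by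
        cases hj : L.findIdx? (fun l => PySem.Chars.isIn key l) with
        | none =>
          exfalso
          have := (List.findIdx?_eq_none_iff.mp hj) l₀ hl₀
          rw [PySem.Chars.isIn_eq_false_iff] at this
          exact this hinf₀
        | some j => exact ⟨j, rfl⟩
      obtain ⟨hjlt, hjp, hjmin⟩ := List.findIdx?_eq_some_iff_getElem.mp hj
      rw [hj]
      simp only [Option.map_some, Nat.zero_add, List.isEmpty_nil]
      rw [List.getElem?_eq_getElem hjlt]
      simp only [Option.getD_some]
      -- decompose the line list around line j
      set P := L.take j with hPdef
      set lj := L[j] with hljdef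
      set S := L.drop (j + 1) with hSdef
      have hdec : L = P ++ lj :: S := by
        rw [hPdef, hljdef, hSdef, ← List.drop_eq_getElem_cons hjlt, List.take_append_drop]
      have hPlen : P.length = j := by
        rw [hPdef, List.length_take]; omega
      have hPprop : ∀ l ∈ P, '\n' ∉ l ∧ ¬ key <:+: l := by
        intro l hl
        obtain ⟨i, hi, hieq⟩ := List.mem_take_iff_getElem.mp (hPdef ▸ hl)
        refine ⟨hfreeL l (List.mem_of_mem_take (hPdef ▸ hl)), ?_⟩
        intro hinf
        have := hjmin i (by omega)
        rw [hieq] at this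
        exact this ((PySem.Chars.isIn_iff_infix _ _).mpr hinf)
      set W := P.flatMap (fun l => l ++ ['\n']) with hWdef
      obtain ⟨R, hcseq, hjoinS, hRcase⟩ :
          ∃ R, cs = W ++ (lj ++ R) ∧ (∀ x, PySem.Chars.join ['\n'] (x :: S) = x ++ R)
            ∧ (R = [] ∨ ∃ R', R = '\n' :: R') := by
        cases hS : S with
        | nil =>
          refine ⟨[], ?_, fun x => by rw [PySem.Chars.join_singleton]; simp, Or.inl rfl⟩
          rw [← hjoin, hdec, hS, pv_join_append '\n' P [lj] (by simp), PySem.Chars.join_singleton]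
          simp [hWdef]
        | cons s0 S' =>
          refine ⟨'\n' :: PySem.Chars.join ['\n'] (s0 :: S'), ?_,
            fun x => by rw [PySem.Chars.join_cons_cons]; simp, Or.inr ⟨_, rfl⟩⟩
          rw [← hjoin, hdec, hS, pv_join_append '\n' P (lj :: s0 :: S') (by simp),
            PySem.Chars.join_cons_cons]
          simp [hWdef]
      have hljfree : '\n' ∉ lj :=
        hfreeL lj (by rw [hdec]; exact List.mem_append_right _ (List.mem_cons_self ..))
      have hljinf : key <:+: lj := (PySem.Chars.isIn_iff_infix _ _).mp hjp
      -- the first occurrence of the key inside its line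
      have hflnn : 0 ≤ PySem.Chars.find lj key := (PySem.Chars.find_nonneg_iff lj key).mpr hljinf
      set p := (PySem.Chars.find lj key).toNat with hpdef
      obtain ⟨hp1, hp2⟩ := PySem.Chars.find_spec (s := lj) (sub := key) hflnn
      rw [← hpdef] at hp1 hp2
      have hplt : p < lj.length := by
        have hne : lj.drop p ≠ [] := by
          intro hcon
          rw [hcon, List.prefix_nil] at hp1
          exact hk hp1
        have hlz : (lj.drop p).length ≠ 0 := fun h0 => hne (List.eq_nil_of_length_eq_zero h0)
        rw [List.length_drop] at hlz; omega
      -- index bookkeeping on the flat string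
      have hdropk : ∀ q : Nat, q ≤ lj.length →
          List.drop (W.length + q) cs = lj.drop q ++ R := by
        intro q hq
        rw [hcseq, List.drop_append, List.drop_eq_nil_of_le (by omega), List.nil_append,
          show W.length + q - W.length = q by omega, List.drop_append_of_le_length hq]
      have htakek : ∀ q : Nat, q ≤ lj.length →
          List.take (W.length + q) cs = W ++ lj.take q := by
        intro q hq
        rw [hcseq, List.take_append, List.take_of_length_le (by omega),
          show W.length + q - W.length = q by omega, List.take_append_of_le_length hq]
      have hposval : PySem.Chars.find cs key = ((W.length + p : Nat) : Int) := by
        apply pv_find_eq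
        · rw [hdropk p (le_of_lt hplt)]
          exact hp1.trans (List.prefix_append _ _)
        · intro i hi hpre
          by_cases hiW : i < W.length
          · rw [hcseq] at hpre
            exact pv_occ_flatMap '\n' key hfree P hPprop (lj ++ R) i (hWdef ▸ hiW) hpre
          · obtain ⟨q, hq⟩ : ∃ q, i = W.length + q := ⟨i - W.length, by omega⟩
            have hqp : q < p := by omega
            rw [hq, hdropk q (by omega)] at hpre
            have hkpre : key <+: lj.drop q := by
              rcases hRcase with hR | ⟨R', hR⟩
              · rwa [hR, List.append_nil] at hpre
              · rw [hR] at hpre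
                exact (pv_prefix_cut '\n' key hfree _ _).mp hpre
            exact hp2 q hqp hkpre
      have hposlt : W.length + p < cs.length := by
        rw [hcseq]; simp only [List.length_append]; omega
      rw [hposval]
      rw [if_neg (by omega : ¬ ((W.length + p : Nat) : Int) = -1)]
      -- the enclosing line's start
      have hrfval : PySem.Chars.rfind (List.take (W.length + p) cs) ['\n']
          = (W.length : Int) - 1 := by
        rw [htakek p (le_of_lt hplt)]
        have htpfree : '\n' ∉ lj.take p := fun hm => hljfree (List.mem_of_mem_take hm)
        by_cases hP0 : P = []
        · have hW0 : W = [] := by rw [hWdef, hP0]; simp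
          rw [hW0, List.nil_append, pv_rfind_none '\n' _ htpfree]
          simp
        · obtain ⟨V, hV⟩ := pv_flatMap_last '\n' P hP0
          have hVW : W = V ++ ['\n'] := hWdef.trans hV
          rw [hVW, List.append_assoc, List.singleton_append,
            pv_rfind_last '\n' V (lj.take p) htpfree]
          simp only [List.length_append, List.length_cons, List.length_nil]
          push_cast
          ring
      have hstart : PySem.Chars.rfindFrom cs ['\n'] 0 (some ((W.length + p : Nat) : Int)) + 1
          = ((W.length : Nat) : Int) := by
        rw [PySem.Chars.rfindFrom]
        rw [if_neg (by exact_mod_cast Nat.not_lt.mpr (le_of_lt hposlt) :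
            ¬ ((cs.length : Int) < ((W.length + p : Nat) : Int)))]
        rw [if_neg (by omega : ¬ ((W.length + p : Nat) : Int) < 0)]
        rw [if_neg (by omega : ¬ (0 : Int) < 0)]
        rw [if_neg (by omega : ¬ ((W.length + p : Nat) : Int) < 0)]
        simp only [Int.toNat_zero, Int.toNat_natCast, List.drop_zero]
        rw [hrfval]
        split_ifs with h <;> omega
      rw [hstart]
      -- the enclosing line's end
      have hcsl : (cs.length : Int) = ((W.length + (lj.length + R.length) : Nat) : Int) := by
        rw [hcseq]; simp
      have hdpfree : '\n' ∉ lj.drop p := fun hm => hljfree (List.mem_of_mem_drop hm)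
      have hend : (if PySem.Chars.findFrom cs ['\n'] ((W.length + p : Nat) : Int) none = -1
            then (cs.length : Int)
            else PySem.Chars.findFrom cs ['\n'] ((W.length + p : Nat) : Int) none)
          = ((W.length + lj.length : Nat) : Int) := by
        rw [PySem.Chars.findFrom_natCast cs ['\n'] (W.length + p) (le_of_lt hposlt)]
        rw [hdropk p (le_of_lt hplt)]
        rcases hRcase with hR | ⟨R', hR⟩
        · have hf : PySem.Chars.find (lj.drop p ++ R) ['\n'] = -1 := by
            rw [hR, List.append_nil]
            exact (PySem.Chars.find_eq_neg_one_iff _ _).mpr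
              (fun hinf => hdpfree ((pv_singleton_infix _ _).mp hinf))
          rw [hf]
          rw [if_pos rfl]
          rw [hcsl, hR]
          simp
        · have hf : PySem.Chars.find (lj.drop p ++ R) ['\n'] = (((lj.drop p).length : Nat) : Int) := by
            rw [hR]
            exact pv_find_first '\n' (lj.drop p) R' hdpfree
          rw [hf]
          rw [if_neg (by omega : ¬ (((lj.drop p).length : Nat) : Int) = -1)]
          rw [if_neg (by
            simp only [List.length_drop]
            omega : ¬ ((W.length + p : Nat) : Int) + (((lj.drop p).length : Nat) : Int) = -1)]
          simp only [List.length_drop]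
          omega
      rw [hend]
      -- the four slices of the flat string
      have hsl1 : PySem.List.slice cs none (some ((W.length : Nat) : Int)) = W := by
        rw [PySem.List.slice_to_natCast, hcseq]
        exact List.take_left
      have hslmid : PySem.List.slice cs (some ((W.length : Nat) : Int))
          (some ((W.length + lj.length : Nat) : Int)) = lj := by
        rw [PySem.List.slice_natCast, hcseq, List.drop_left,
          show W.length + lj.length - W.length = lj.length by omega]
        exact List.take_left
      have hslpre : PySem.List.slice cs (some ((W.length : Nat) : Int))
          (some ((W.length + p : Nat) : Int)) = lj.take p := by
        rw [PySem.List.slice_natCast, hcseq, List.drop_left,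
          show W.length + p - W.length = p by omega]
        exact List.take_append_of_le_length (le_of_lt hplt)
      have hslend : PySem.List.slice cs (some ((W.length + lj.length : Nat) : Int)) none = R := by
        rw [PySem.List.slice_from_natCast, hcseq, ← List.append_assoc,
          show W.length + lj.length = (W ++ lj).length by simp]
        exact List.drop_left
      rw [hsl1, hslmid, hslpre, hslend]
      -- the first document line is the same on both sides
      rw [pv_splitMax_headD '\n' (List.dropWhile (fun x => x == '\n') cs), pv_fdl '\n' cs,
        ← hLdef]
      -- the prefix of the line before the key, on A's side
      rw [pv_splitOn_headD key lj, pv_pref_take key p lj hp1 hp2]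
      -- the indentation widths agree
      rw [pv_indent_eq, pv_indent_eq]
      -- the formatted replacement text agrees
      rw [pv_join_replace]
      -- final assembly
      have hasm : ∀ x : List Char, PySem.Chars.join ['\n'] (L.set j x) = W ++ (x ++ R) := by
        intro x
        rw [hdec, List.set_append_right (s := P) (t := lj :: S) j x (le_of_eq hPlen),
          show j - P.length = 0 by omega, List.set_cons_zero,
          pv_join_append '\n' P _ (by simp), hjoinS, ← hWdef]
      rw [hasm]
      simp [List.append_assoc]
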